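-- pv_equiv track=rewrite | github.com/sosdarko/Problem-Solving | leetcode.python/special_binary_string.py | isSpecial
-- ===== SOURCE A (Python) =====
-- def isSpecial(str):
--     num0 = 0
--     num1 = 0
--     for x in str:
--         if x=='0':
--             num0 += 1
--         if x=='1':
--             num1 += 1
--         if num0 > num1:
--             return False
--     if num0 != num1:
--         return False
--     else:
--         return True
-- ===== SOURCE B (Python) =====
-- def isSpecial(str):
--     s = ''.join(c for c in str if c in '01')
--     while '10' in s:
--         s = s.replace('10', '')
--     return s == ''
-- ===== Notes on version B (the rewrite author's own statement) =====
-- stated objective: alternative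
-- what changed: Replaces A's two-counter early-exit scan with a string-rewriting algorithm: keep only the '0'/'1' characters, then repeatedly delete "10" substrings with str.replace until none remain; the string is special iff the residue is empty.
import Mathlib
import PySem

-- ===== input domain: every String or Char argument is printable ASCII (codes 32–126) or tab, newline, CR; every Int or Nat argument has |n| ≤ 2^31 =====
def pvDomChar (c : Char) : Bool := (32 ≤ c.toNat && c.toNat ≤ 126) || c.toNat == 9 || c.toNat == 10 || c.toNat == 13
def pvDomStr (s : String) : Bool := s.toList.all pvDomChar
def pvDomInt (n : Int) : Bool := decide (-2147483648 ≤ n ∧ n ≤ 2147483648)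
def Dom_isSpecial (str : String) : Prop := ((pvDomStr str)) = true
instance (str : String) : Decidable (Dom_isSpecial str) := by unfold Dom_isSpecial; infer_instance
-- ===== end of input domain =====

-- B replaces A's two-counter early-exit scan with string rewriting: filter to '0'/'1',
-- then repeatedly delete "10" substrings; the string is special iff the residue is empty
-- (alternative algorithm, same result).


-- ===== PORT A =====
-- the loop over the characters with the two counters and the early return
def isSpecialGo : List Char → Int → Int → Bool
  | [], num0, num1 => num0 == num1
  | x :: rest, num0, num1 =>
    let num0' := if x = '0' then num0 + 1 else num0
    let num1' := if x = '1' then num1 + 1 else num1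
    if num0' > num1' then false else isSpecialGo rest num0' num1'

def isSpecial (str : String) : Bool := isSpecialGo str.toList 0 0

-- ===== PORT B =====
-- strings are ported as List Char; s.replace("10", "") is pvRm10 (leftmost, non-overlapping
-- scan, exact for this two-character pattern) and '"10" in s' is pvHas10 (exact)
def pvRm10 : List Char → List Char
  | c :: d :: rest => if c = '1' ∧ d = '0' then pvRm10 rest else c :: pvRm10 (d :: rest)
  | l => l

def pvHas10 : List Char → Bool
  | c :: d :: rest => (c == '1' && d == '0') || pvHas10 (d :: rest)
  | _ => false

theorem pvRm10_length_le (l : List Char) : (pvRm10 l).length ≤ l.length := by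
  fun_induction pvRm10 l <;> simp_all <;> omega

theorem pvRm10_length_lt (l : List Char) (h : pvHas10 l = true) :
    (pvRm10 l).length < l.length := by
  fun_induction pvRm10 l with
  | case1 c d rest hcd ih => have := pvRm10_length_le rest; simp; omega
  | case2 c d rest hcd ih =>
      have hr : pvHas10 (d :: rest) = true := by
        simp [pvHas10] at h
        rcases h with ⟨h1, h2⟩ | h
        · exact absurd ⟨h1, h2⟩ hcd
        · exact h
      have := ih hr
      simp only [List.length_cons] at this ⊢
      omega
  | case3 l hshape =>
      exfalso
      match l, hshape with
      | [], _ => simp [pvHas10] at h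
      | [c], _ => simp [pvHas10] at h
      | c :: d :: rest, hs => exact hs c d rest rfl

-- the 'while "10" in s' loop
def pvReduce10 (s : List Char) : List Char :=
  if h : pvHas10 s = true then pvReduce10 (pvRm10 s) else s
termination_by s.length
decreasing_by exact pvRm10_length_lt s h

def isSpecial_alt (str : String) : Bool :=
  let s := str.toList.filter (fun c => c == '0' || c == '1')
  pvReduce10 s == []

-- ===== PRECONDITION & SPEC =====
def Spec_isSpecial (str : String) (out : Bool) : Prop := out = isSpecial_alt str
instance (str : String) (out : Bool) : Decidable (Spec_isSpecial str out) := by unfold Spec_isSpecial; infer_instance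

-- ===== CLAIM (what is proved, stated in full; the proofs are below) =====
def Claim_equal_isSpecial : Prop := ∀ (str : String), Dom_isSpecial str → Spec_isSpecial str (isSpecial str)

-- ===== LEMMAS AND PROOFS =====

-- A's control flow expressed on the signed balance num1-num0
def pvDelta (c : Char) : Int := if c = '1' then 1 else if c = '0' then -1 else 0

def pvCheck : List Int → Int → Bool
  | [], b => b == 0
  | d :: rest, b => if b + d < 0 then false else pvCheck rest (b + d)

theorem pvDelta_one : pvDelta '1' = 1 := by decide
theorem pvDelta_zero : pvDelta '0' = -1 := by decide

theorem isSpecialGo_eq_check (cs : List Char) (num0 num1 : Int) :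
    isSpecialGo cs num0 num1 = pvCheck (cs.map pvDelta) (num1 - num0) := by
  induction cs generalizing num0 num1 with
  | nil => simp [isSpecialGo, pvCheck]; omega
  | cons x rest ih =>
    simp only [isSpecialGo, List.map, pvCheck]
    by_cases h1 : x = '1'
    · have h0 : ¬ x = '0' := by simp [h1]
      simp [h1, pvDelta, ih]
      rw [show num1 + 1 - num0 = num1 - num0 + 1 from by omega,
        decide_eq_decide.mpr (show (num1 + 1 < num0) ↔ (num1 - num0 + 1 < 0) from by omega)]
    · by_cases h0 : x = '0'
      · have e : decide (num1 ≤ num0) = decide (num1 - num0 < 1) := by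
          simp only [decide_eq_decide]; omega
        simp [h0, pvDelta, ih]
        rw [e, show num1 - (num0 + 1) = num1 - num0 + -1 from by omega]
      · simp [h0, h1, pvDelta, ih]

-- dropping non-bit characters does not change the check (their delta is 0)
theorem pvCheck_filter (cs : List Char) (b : Int) (hb : 0 ≤ b) :
    pvCheck ((cs.filter (fun c => c == '0' || c == '1')).map pvDelta) b
      = pvCheck (cs.map pvDelta) b := by
  induction cs generalizing b with
  | nil => rfl
  | cons x rest ih =>
    by_cases hbit : (x == '0' || x == '1') = true
    · rw [List.filter_cons, if_pos hbit]
      simp only [List.map_cons, pvCheck]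
      split
      · rfl
      · next h => exact ih (b + pvDelta x) (by omega)
    · rw [List.filter_cons, if_neg hbit]
      have hd : pvDelta x = 0 := by
        simp at hbit
        simp [pvDelta, hbit.1, hbit.2]
      simp only [List.map_cons, pvCheck, hd]
      rw [show b + 0 = b from by omega, if_neg (by omega)]
      exact ih b hb

-- deleting "10" pairs does not change the check, for nonnegative starting balance
theorem pvCheck_rm10 (l : List Char) (b : Int) (hb : 0 ≤ b) :
    pvCheck ((pvRm10 l).map pvDelta) b = pvCheck (l.map pvDelta) b := by
  fun_induction pvRm10 l generalizing b with
  | case1 c d rest hcd ih =>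
      rcases hcd with ⟨hc, hd⟩
      subst hc; subst hd
      simp only [List.map_cons, pvCheck, pvDelta_one, pvDelta_zero]
      rw [if_neg (by omega), if_neg (by omega), show b + 1 + -1 = b from by omega]
      exact ih b hb
  | case2 c d rest hcd ih =>
      simp only [List.map_cons, pvCheck]
      split
      · rfl
      · next h => exact ih (b + pvDelta c) (by omega)
  | case3 l hshape => rfl

-- the residue is a sublist, so bit-ness is preserved
theorem pvRm10_sublist (l : List Char) : (pvRm10 l).Sublist l := by
  fun_induction pvRm10 l with
  | case1 c d rest hcd ih => exact ih.trans ((List.sublist_cons_self d rest).trans (List.sublist_cons_self c _))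
  | case2 c d rest hcd ih => exact ih.cons₂ c
  | case3 l hshape => exact List.Sublist.refl l

-- a run of '1's never passes the check (the balance ends positive)
theorem pvCheck_ones (t : List Char) (b : Int) (hb : 0 ≤ b)
    (hbit : ∀ c ∈ t, c = '0' ∨ c = '1')
    (h10 : pvHas10 ('1' :: t) = false) :
    pvCheck (('1' :: t).map pvDelta) b = false := by
  induction t generalizing b with
  | nil =>
    simp only [List.map_cons, List.map_nil, pvCheck, pvDelta_one]
    rw [if_neg (by omega)]
    simp; omega
  | cons c rest ih =>
    have hc : c = '1' := by
      rcases hbit c (by simp) with h | h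
      · exfalso; rw [h] at h10; simp [pvHas10] at h10
      · exact h
    subst hc
    have h10' : pvHas10 ('1' :: rest) = false := by
      simp [pvHas10] at h10 ⊢
      exact h10
    have step := ih (b + 1) (by omega) (fun c hc => hbit c (by simp [hc])) h10'
    simp only [List.map_cons, pvCheck, pvDelta_one] at step ⊢
    rw [if_neg (by omega)] at step
    rw [if_neg (by omega), if_neg (by omega)]
    exact step

-- a fully reduced bit string passes the check iff it is empty
theorem pvCheck_no10 (s : List Char) (hbit : ∀ c ∈ s, c = '0' ∨ c = '1')
    (h10 : pvHas10 s = false) :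
    pvCheck (s.map pvDelta) 0 = s.isEmpty := by
  cases s with
  | nil => rfl
  | cons c rest =>
    rcases hbit c (by simp) with h | h
    · subst h
      simp only [List.map_cons, pvCheck, pvDelta_zero]
      rw [if_pos (by omega)]
      simp
    · subst h
      rw [pvCheck_ones rest 0 le_rfl (fun c hc => hbit c (by simp [hc])) h10]
      rfl

-- the reduction loop decides the check
theorem pvCheck_reduce10 (s : List Char) (hbit : ∀ c ∈ s, c = '0' ∨ c = '1') :
    pvCheck (s.map pvDelta) 0 = (pvReduce10 s == []) := by
  fun_induction pvReduce10 s with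
  | case1 s h ih =>
      rw [← pvCheck_rm10 s 0 le_rfl]
      exact ih (fun c hc => hbit c ((pvRm10_sublist s).mem hc))
  | case2 s h =>
      rw [pvCheck_no10 s hbit (by simpa using h)]
      cases s <;> simp

-- ===== VERDICT (by name: the statement is the Claim_ definition above) =====
theorem isSpecial_spec : Claim_equal_isSpecial := by
  intro str _
  unfold Spec_isSpecial isSpecial isSpecial_alt
  rw [isSpecialGo_eq_check]
  simp only [show (0 : Int) - 0 = 0 from rfl]
  rw [← pvCheck_filter str.toList 0 le_rfl,
    pvCheck_reduce10 _ (by intro c hc; simp [List.mem_filter] at hc; tauto)]
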